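-- pv_equiv track=rewrite | github.com/RoboticsLabURJC/2020-phd-ruben-lucas | src/RL-Studio/rl_studio/envs/carla/utils/perceptions_benchmark_automatic.py | wasDetected
-- ===== SOURCE A (Python) =====
-- def wasDetected(labels: list):
--     if not labels:
--         return False  # Empty list is a failure
--
--     # Check for yolop_v2_lines failure case (all zeros)
--     is_all_zeros = all(x == 0 for x in labels)
--     if is_all_zeros:
--         return False
--
--     # Check for other modes' failure case (all abs(1))
--     is_all_ones = all(abs(x) == 1 for x in labels)
--     if is_all_ones:
--         return False
--
--     # If neither failure case is met, it's a success
--     return True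
-- ===== SOURCE B (Python) =====
-- def wasDetected(labels: list):
--     has_nonzero = False
--     has_non_one = False
--     for x in labels:
--         if x != 0:
--             has_nonzero = True
--         if abs(x) != 1:
--             has_non_one = True
--     return has_nonzero and has_non_one
-- ===== Notes on version B (the rewrite author's own statement) =====
-- stated objective: simpler
-- what changed: Replaces the empty-list guard plus two separate all(...) scans with one single loop maintaining two booleans (has_nonzero, has_non_one); the empty case falls out automatically.
import Mathlib
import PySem

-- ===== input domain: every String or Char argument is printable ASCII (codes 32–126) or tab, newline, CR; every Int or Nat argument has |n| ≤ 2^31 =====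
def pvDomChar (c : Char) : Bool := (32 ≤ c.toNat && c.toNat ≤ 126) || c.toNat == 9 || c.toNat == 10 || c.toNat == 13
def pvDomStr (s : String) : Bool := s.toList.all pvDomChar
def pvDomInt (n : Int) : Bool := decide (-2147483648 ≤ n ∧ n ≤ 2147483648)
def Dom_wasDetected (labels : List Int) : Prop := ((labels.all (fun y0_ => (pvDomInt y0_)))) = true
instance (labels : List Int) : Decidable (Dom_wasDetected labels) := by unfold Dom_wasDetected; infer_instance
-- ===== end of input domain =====

-- B replaces A's empty-list guard plus two separate all(...) scans by one single loop
-- maintaining two booleans; objective: simpler. Return values proved equal on all inputs.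

-- ===== PORT A =====
def wasDetected (labels : List Int) : Bool :=
  if labels.isEmpty then false
  else
    let is_all_zeros := labels.all (fun x => x == 0)
    if is_all_zeros then false
    else
      let is_all_ones := labels.all (fun x => |x| == 1)
      if is_all_ones then false
      else true

-- ===== PORT B =====
def wasDetected_alt (labels : List Int) : Bool :=
  let st := labels.foldl
    (fun (p : Bool × Bool) x =>
      (if x ≠ 0 then true else p.1, if |x| ≠ 1 then true else p.2))
    (false, false)
  st.1 && st.2

-- ===== PRECONDITION & SPEC =====
def Spec_wasDetected (labels : List Int) (out : Bool) : Prop := out = wasDetected_alt labels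
instance (labels : List Int) (out : Bool) : Decidable (Spec_wasDetected labels out) := by unfold Spec_wasDetected; infer_instance

-- ===== CLAIM (what is proved, stated in full; the proofs are below) =====
def Claim_equal_wasDetected : Prop := ∀ (labels : List Int), Dom_wasDetected labels → Spec_wasDetected labels (wasDetected labels)

-- ===== LEMMAS AND PROOFS =====

-- B's fold accumulates "some element is ≠ 0" and "some element has |·| ≠ 1".
theorem wasDetected_foldl_eq (labels : List Int) (a b : Bool) :
    labels.foldl
      (fun (p : Bool × Bool) x =>
        (if x ≠ 0 then true else p.1, if |x| ≠ 1 then true else p.2))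
      (a, b)
    = (a || labels.any (fun x => x ≠ 0), b || labels.any (fun x => |x| ≠ 1)) := by
  induction labels generalizing a b with
  | nil => simp
  | cons y ys ih =>
      simp only [List.foldl_cons, List.any_cons, ih]
      by_cases hy : y = 0 <;> by_cases hy1 : |y| = 1 <;>
        simp [hy, hy1, Bool.or_assoc]

theorem wasDetected_eq_alt (labels : List Int) :
    wasDetected labels = wasDetected_alt labels := by
  unfold wasDetected wasDetected_alt
  rw [wasDetected_foldl_eq]
  cases labels with
  | nil => rfl
  | cons y ys =>
      have e1 : ((y :: ys).any fun x => decide (x ≠ 0))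
          = !((y :: ys).all fun x => x == 0) := by
        rw [List.not_all_eq_any_not]
        simp [beq_eq_decide]
      have e2 : ((y :: ys).any fun x => decide (|x| ≠ 1))
          = !((y :: ys).all fun x => |x| == 1) := by
        rw [List.not_all_eq_any_not]
        simp [beq_eq_decide]
      simp only [List.isEmpty_cons, Bool.false_eq_true, if_false, Bool.false_or, e1, e2]
      by_cases hz : ((y :: ys).all fun x => x == 0) = true <;>
        by_cases ho : ((y :: ys).all fun x => |x| == 1) = true <;>
          simp [hz, ho]

-- ===== VERDICT (by name: the statement is the Claim_ definition above) =====
theorem wasDetected_spec : Claim_equal_wasDetected := by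
  intro labels _
  unfold Spec_wasDetected
  exact wasDetected_eq_alt labels
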